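-- pv_equiv track=rewrite | github.com/ConstantinLenoir/moi | moi/textEditor.py | pos_to_line_column
-- ===== SOURCE A (Python) =====
-- def pos_to_line_column(s,
--                        i,
--                        line_base = 1,
--                        column_base = 0):
--     """
--     i is alowed to be len(s) (the 'x' additional character).
--     Line ending groups are always included for obvious reasons.
--     """
--     if not -1 <= i <= len(s):
--         raise IndexError()
--     if i == -1:
--         return (line_base, column_base)
--     s = s + 'x'
--     lines = s.splitlines(keepends = True)
--     line_nb = 0
--     counter = 0
--     next_value = len(lines[line_nb])
--     while next_value <= i:
--         line_nb += 1
--         counter = next_value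
--         next_value += len(lines[line_nb])
--     return (line_nb + line_base,
--             i - counter + column_base)
-- ===== SOURCE B (Python) =====
-- def pos_to_line_column(s,
--                        i,
--                        line_base = 1,
--                        column_base = 0):
--     """Prefix-sum table over the lines, then binary search (bisect_right)
--     instead of A's linear walk."""
--     if not -1 <= i <= len(s):
--         raise IndexError()
--     if i == -1:
--         return (line_base, column_base)
--     lines = (s + 'x').splitlines(keepends=True)
--     cum = []
--     total = 0
--     for line in lines:
--         total += len(line)
--         cum.append(total)
--     lo, hi = 0, len(cum)
--     while lo < hi:  # hand-rolled bisect_right(cum, i)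
--         mid = (lo + hi) // 2
--         if cum[mid] <= i:
--             lo = mid + 1
--         else:
--             hi = mid
--     start = cum[lo - 1] if lo else 0
--     return (lo + line_base, i - start + column_base)
-- ===== Notes on version B (the rewrite author's own statement) =====
-- stated objective: alternative
-- what changed: Replaces A's linear walk through the line list (line_nb/counter/next_value) by a prefix-sum (cumulative offset) table over the lines followed by a hand-rolled bisect_right binary search for the line containing i.
import Mathlib
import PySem

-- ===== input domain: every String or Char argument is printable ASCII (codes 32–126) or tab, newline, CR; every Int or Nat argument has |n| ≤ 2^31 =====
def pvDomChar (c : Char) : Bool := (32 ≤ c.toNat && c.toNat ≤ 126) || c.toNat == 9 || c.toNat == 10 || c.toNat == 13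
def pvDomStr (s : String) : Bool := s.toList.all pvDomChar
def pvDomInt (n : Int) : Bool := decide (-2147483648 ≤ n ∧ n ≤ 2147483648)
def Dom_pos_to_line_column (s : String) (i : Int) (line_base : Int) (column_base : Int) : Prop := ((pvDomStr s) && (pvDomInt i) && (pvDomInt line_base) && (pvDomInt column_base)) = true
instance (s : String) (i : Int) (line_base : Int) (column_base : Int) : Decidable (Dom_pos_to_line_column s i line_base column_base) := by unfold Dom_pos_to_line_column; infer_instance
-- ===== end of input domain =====

-- B replaces A's linear walk over the line list by a prefix-sum table plus a binary search
-- (bisect_right); objective: alternative algorithm, same asymptotic cost overall.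

-- splitlines(keepends=True), hand-ported: exact on Dom (the only line-break characters
-- admitted by Dom are '\n', '\r' and the group '\r\n'); shared by both ports since both
-- Pythons call s.splitlines(keepends=True).
def splitKeepAux : List Char → List Char → List (List Char)
  | [], acc => if acc.isEmpty then [] else [acc.reverse]
  | '\r' :: '\n' :: rest, acc => (acc.reverse ++ ['\r', '\n']) :: splitKeepAux rest []
  | c :: rest, acc =>
    if c = '\n' then (acc.reverse ++ ['\n']) :: splitKeepAux rest []
    else if c = '\r' then (acc.reverse ++ ['\r']) :: splitKeepAux rest []
    else splitKeepAux rest (c :: acc)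

def splitKeep (cs : List Char) : List (List Char) := splitKeepAux cs []

-- ===== PORT A =====
-- A's while loop: line_nb / counter / next_value walk over the remaining lines
def loopA : List (List Char) → Int → Int → Int → Int → Int × Int
  | lines, i, line_nb, counter, next_value =>
    if next_value ≤ i then
      match lines with
      | [] => (line_nb, i - counter)  -- Python raises IndexError here; unreachable for -1 ≤ i ≤ len s
      | l :: rest => loopA rest i (line_nb + 1) next_value (next_value + (l.length : Int))
    else (line_nb, i - counter)

def pos_to_line_column (s : String) (i : Int) (line_base : Int) (column_base : Int) : Int × Int :=
  if ¬(-1 ≤ i ∧ i ≤ (s.toList.length : Int)) then (0, 0)  -- IndexError; excluded by Pre_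
  else if i = -1 then (line_base, column_base)
  else
    match splitKeep (s.toList ++ ['x']) with
    | [] => (0, 0)  -- lines[0] would raise; unreachable (s + 'x' is nonempty)
    | l0 :: rest =>
      let r := loopA rest i 0 0 (l0.length : Int)
      (r.1 + line_base, r.2 + column_base)

-- ===== PORT B =====
-- hand-rolled bisect_right of Source B
def bsearch (cum : List Int) (i : Int) (lo hi : Nat) : Nat :=
  if h : lo < hi then
    if cum.getD ((lo + hi) / 2) 0 ≤ i then bsearch cum i ((lo + hi) / 2 + 1) hi
    else bsearch cum i lo ((lo + hi) / 2)
  else lo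
termination_by hi - lo
decreasing_by all_goals omega

def pos_to_line_column_alt (s : String) (i : Int) (line_base : Int) (column_base : Int) : Int × Int :=
  if ¬(-1 ≤ i ∧ i ≤ (s.toList.length : Int)) then (0, 0)  -- IndexError; excluded by Pre_
  else if i = -1 then (line_base, column_base)
  else
    let lines := splitKeep (s.toList ++ ['x'])
    let cum := (lines.foldl
      (fun (p : List Int × Int) line =>
        (p.1 ++ [p.2 + (line.length : Int)], p.2 + (line.length : Int))) ([], 0)).1
    let lo := bsearch cum i 0 cum.length
    let start := if lo = 0 then 0 else cum.getD (lo - 1) 0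
    ((lo : Int) + line_base, i - start + column_base)

-- ===== PRECONDITION & SPEC =====
-- Pre_ excludes exactly the inputs where A raises IndexError (i outside [-1, len(s)]).
def Pre_pos_to_line_column (s : String) (i : Int) (line_base : Int) (column_base : Int) : Prop :=
  -1 ≤ i ∧ i ≤ (s.toList.length : Int)
instance (s : String) (i : Int) (line_base : Int) (column_base : Int) : Decidable (Pre_pos_to_line_column s i line_base column_base) := by unfold Pre_pos_to_line_column; infer_instance

def pvWitness_pos_to_line_column : String × Int × Int × Int := ("ab\ncd", 4, 1, 0)

def Spec_pos_to_line_column (s : String) (i : Int) (line_base : Int) (column_base : Int) (out : Int × Int) : Prop := out = pos_to_line_column_alt s i line_base column_base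
instance (s : String) (i : Int) (line_base : Int) (column_base : Int) (out : Int × Int) : Decidable (Spec_pos_to_line_column s i line_base column_base out) := by unfold Spec_pos_to_line_column; infer_instance

-- ===== CLAIM (what is proved, stated in full; the proofs are below) =====
def Claim_equal_pos_to_line_column : Prop := ∀ (s : String) (i : Int) (line_base : Int) (column_base : Int), Dom_pos_to_line_column s i line_base column_base → Pre_pos_to_line_column s i line_base column_base → Spec_pos_to_line_column s i line_base column_base (pos_to_line_column s i line_base column_base)

-- ===== LEMMAS AND PROOFS =====

-- cumulative line-length list starting from offset b
def cums (b : Int) : List (List Char) → List Int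
  | [] => []
  | l :: t => (b + (l.length : Int)) :: cums (b + (l.length : Int)) t

def sumLen (ls : List (List Char)) : Int := ls.foldr (fun l a => (l.length : Int) + a) 0

-- canonical answers: number of cumulative offsets ≤ i, and the last one ≤ i
def refK (cum : List Int) (i : Int) : Nat := (cum.takeWhile (fun c => decide (c ≤ i))).length
def refStart (d : Int) (cum : List Int) (i : Int) : Int :=
  (cum.takeWhile (fun c => decide (c ≤ i))).getLastD d

lemma sumLen_cons (l : List Char) (t : List (List Char)) :
    sumLen (l :: t) = (l.length : Int) + sumLen t := rfl

lemma sumLen_splitKeepAux : ∀ (cs acc : List Char),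
    sumLen (splitKeepAux cs acc) = (cs.length : Int) + (acc.length : Int) := by
  intro cs acc
  fun_induction splitKeepAux cs acc <;>
    simp_all [splitKeepAux, sumLen_cons, sumLen, List.isEmpty_iff] <;> push_cast <;> omega

lemma sumLen_nil : sumLen [] = 0 := rfl

lemma splitKeep_ne_nil (cs : List Char) (h : cs ≠ []) : splitKeep cs ≠ [] := by
  intro heq
  have h1 := sumLen_splitKeepAux cs []
  rw [show splitKeepAux cs [] = splitKeep cs from rfl, heq, sumLen_nil] at h1
  have : cs.length = 0 := by simpa using h1.symm
  exact h (List.length_eq_zero_iff.mp this)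

lemma refK_cons_pos (c : Int) (cs : List Int) (i : Int) (hc : c ≤ i) :
    refK (c :: cs) i = refK cs i + 1 := by
  simp [refK, List.takeWhile_cons, hc]

lemma refK_cons_neg (c : Int) (cs : List Int) (i : Int) (hc : ¬ c ≤ i) :
    refK (c :: cs) i = 0 := by
  simp [refK, List.takeWhile_cons, hc]

lemma refStart_cons_pos (d c : Int) (cs : List Int) (i : Int) (hc : c ≤ i) :
    refStart d (c :: cs) i = refStart c cs i := by
  simp only [refStart, List.takeWhile_cons, hc, decide_true, if_true]
  cases h : List.takeWhile (fun c => decide (c ≤ i)) cs <;> simp [List.getLastD, h]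

lemma refStart_cons_neg (d c : Int) (cs : List Int) (i : Int) (hc : ¬ c ≤ i) :
    refStart d (c :: cs) i = d := by
  simp [refStart, List.takeWhile_cons, hc]

lemma loopA_eq : ∀ (ls : List (List Char)) (i ln counter nv : Int),
    i < nv + sumLen ls →
    loopA ls i ln counter nv =
      (ln + (refK (nv :: cums nv ls) i : Int), i - refStart counter (nv :: cums nv ls) i) := by
  intro ls
  induction ls with
  | nil =>
      intro i ln counter nv h
      rw [sumLen_nil] at h
      have hnv : ¬ nv ≤ i := by omega
      rw [loopA]
      rw [refK_cons_neg _ _ _ hnv, refStart_cons_neg _ _ _ _ hnv]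
      simp [hnv]
  | cons l t ih =>
      intro i ln counter nv h
      rw [loopA]
      by_cases hnv : nv ≤ i
      · simp only [hnv, if_pos]
        rw [ih i (ln + 1) nv (nv + (l.length : Int))
              (by rw [sumLen_cons] at h; omega)]
        have hcums : cums nv (l :: t) = (nv + (l.length : Int)) :: cums (nv + (l.length : Int)) t := rfl
        rw [hcums, refK_cons_pos _ _ _ hnv, refStart_cons_pos _ _ _ _ hnv]
        refine Prod.ext ?_ rfl
        push_cast; ring
      · simp only [hnv, if_neg, not_false_iff]
        rw [refK_cons_neg _ _ _ hnv, refStart_cons_neg _ _ _ _ hnv]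
        simp [hnv]

lemma cums_ge : ∀ (ls : List (List Char)) (b x : Int), x ∈ cums b ls → b ≤ x := by
  intro ls
  induction ls with
  | nil => intro b x hx; simp [cums] at hx
  | cons l t ih =>
      intro b x hx
      simp [cums] at hx
      rcases hx with hx | hx
      · omega
      · have := ih _ _ hx; omega

lemma cums_pairwise : ∀ (ls : List (List Char)) (b : Int), (cums b ls).Pairwise (· ≤ ·) := by
  intro ls
  induction ls with
  | nil => intro b; simp [cums]
  | cons l t ih =>
      intro b
      simp only [cums, List.pairwise_cons]
      exact ⟨fun x hx => cums_ge t _ x hx, ih _⟩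

lemma foldl_cum : ∀ (ls : List (List Char)) (acc : List Int) (t : Int),
    (ls.foldl (fun (p : List Int × Int) line =>
      (p.1 ++ [p.2 + (line.length : Int)], p.2 + (line.length : Int))) (acc, t)).1
    = acc ++ cums t ls := by
  intro ls
  induction ls with
  | nil => intro acc t; simp [cums]
  | cons l t ih =>
      intro acc b
      simp only [List.foldl_cons, cums]
      rw [ih]
      simp

lemma takeWhile_getD : ∀ (cum : List Int) (i : Int) (j : Nat), j < refK cum i →
    cum.getD j 0 ≤ i := by
  intro cum
  induction cum with
  | nil => intro i j hj; simp [refK] at hj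
  | cons c cs ih =>
      intro i j hj
      by_cases hc : c ≤ i
      · cases j with
        | zero => simpa using hc
        | succ j =>
            simp only [refK, List.takeWhile_cons, hc, decide_true, List.length_cons] at hj
            simpa using ih i j (by simpa [refK] using Nat.lt_of_succ_lt_succ hj)
      · simp [refK, List.takeWhile_cons, hc] at hj
  
lemma not_le_getD_refK : ∀ (cum : List Int) (i : Int), refK cum i < cum.length →
    ¬ cum.getD (refK cum i) 0 ≤ i := by
  intro cum
  induction cum with
  | nil => intro i h; simp [refK] at h
  | cons c cs ih =>
      intro i h
      by_cases hc : c ≤ i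
      · have hr : refK (c :: cs) i = refK cs i + 1 := by
          simp [refK, List.takeWhile_cons, hc]
        rw [hr]
        simpa using ih i (by rw [hr] at h; simpa using h)
      · have hr : refK (c :: cs) i = 0 := by simp [refK, List.takeWhile_cons, hc]
        rw [hr]
        simpa using hc

lemma refK_le_length (cum : List Int) (i : Int) : refK cum i ≤ cum.length :=
  (List.takeWhile_prefix _).sublist.length_le

lemma ge_refK_not_le (cum : List Int) (i : Int) (hs : cum.Pairwise (· ≤ ·))
    (j : Nat) (hj : j < cum.length) (hr : refK cum i ≤ j) : ¬ cum.getD j 0 ≤ i := by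
  have hRlen : refK cum i < cum.length := lt_of_le_of_lt hr hj
  have h1 := not_le_getD_refK cum i hRlen
  rcases Nat.eq_or_lt_of_le hr with heq | hlt
  · rw [← heq]; exact h1
  · have h2 : cum[refK cum i] ≤ cum[j] :=
      (List.pairwise_iff_getElem.mp hs) _ _ hRlen hj hlt
    rw [List.getD_eq_getElem cum 0 hRlen] at h1
    rw [List.getD_eq_getElem cum 0 hj]
    omega

lemma bsearch_eq (cum : List Int) (i : Int) (hs : cum.Pairwise (· ≤ ·)) :
    ∀ (n lo hi : Nat), hi - lo ≤ n → hi ≤ cum.length → lo ≤ refK cum i → refK cum i ≤ hi →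
      bsearch cum i lo hi = refK cum i := by
  intro n
  induction n with
  | zero =>
      intro lo hi h1 h2 h3 h4
      rw [bsearch]
      have hlt : ¬ lo < hi := by omega
      simp [hlt]
      omega
  | succ n ih =>
      intro lo hi h1 h2 h3 h4
      rw [bsearch]
      by_cases hlt : lo < hi
      · simp only [hlt, dif_pos]
        by_cases hm : cum.getD ((lo + hi) / 2) 0 ≤ i
        · simp only [hm, if_pos]
          have hmid : (lo + hi) / 2 < refK cum i := by
            by_contra hcon
            exact ge_refK_not_le cum i hs _ (by omega) (by omega) hm
          exact ih _ _ (by omega) h2 (by omega) h4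
        · simp only [hm, if_neg, not_false_iff]
          have hmid : refK cum i ≤ (lo + hi) / 2 := by
            by_contra hcon
            exact hm (takeWhile_getD cum i _ (by omega))
          exact ih _ _ (by omega) (by omega) h3 hmid
      · simp [hlt]; omega

lemma getLastD_take : ∀ (cum : List Int) (k : Nat) (d : Int), k ≤ cum.length →
    (cum.take k).getLastD d = if k = 0 then d else cum.getD (k - 1) d := by
  intro cum
  induction cum with
  | nil =>
      intro k d h
      have hk : k = 0 := by simpa using h
      subst hk; simp
  | cons c cs ih =>
      intro k d h
      cases k with
      | zero => simp
      | succ k =>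
          simp only [List.take_succ_cons, List.getLastD_cons]
          rw [ih k c (by simpa using h)]
          cases k with
          | zero => simp
          | succ k =>
              have hk : k + 1 - 1 < cs.length := by simp at h; omega
              simp only [Nat.succ_ne_zero, if_false, Nat.add_sub_cancel]
              rw [List.getD_eq_getElem cs c (by omega), List.getD_eq_getElem _ d (by simp; omega)]
              simp

lemma refStart_eq (cum : List Int) (i : Int) (d : Int) :
    refStart d cum i = if refK cum i = 0 then d else cum.getD (refK cum i - 1) d := by
  have hpre : cum.takeWhile (fun c => decide (c ≤ i)) = cum.take (refK cum i) :=
    List.prefix_iff_eq_take.mp (List.takeWhile_prefix _)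
  rw [refStart, hpre, getLastD_take cum _ d (refK_le_length cum i)]
-- ===== VERDICT (by name: the statement is the Claim_ definition above) =====
theorem pos_to_line_column_spec : Claim_equal_pos_to_line_column := by
  unfold Claim_equal_pos_to_line_column
  intro s i lb cb _ hpre
  unfold Spec_pos_to_line_column
  obtain ⟨h1, h2⟩ := hpre
  unfold pos_to_line_column pos_to_line_column_alt
  have hP : ¬¬(-1 ≤ i ∧ i ≤ ((s.toList.length : Int))) := not_not_intro ⟨h1, h2⟩
  simp only [hP, if_neg, not_false_iff, not_not]
  by_cases hi : i = -1
  · simp [hi]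
  · simp only [hi, if_neg, not_false_iff]
    cases hsp : splitKeep (s.toList ++ ['x']) with
    | nil => exact absurd hsp (splitKeep_ne_nil _ (by simp))
    | cons l0 rest =>
      -- total length of the lines = |s| + 1 > i
      have hsum : sumLen (l0 :: rest) = (s.toList.length : Int) + 1 := by
        have := sumLen_splitKeepAux (s.toList ++ ['x']) []
        rw [show splitKeepAux (s.toList ++ ['x']) [] = splitKeep (s.toList ++ ['x']) from rfl,
            hsp] at this
        simpa using this
      have hbound : i < (l0.length : Int) + sumLen rest := by
        rw [sumLen_cons] at hsum; omega
      -- B's cum list is cums 0 (l0 :: rest)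
      have hcum : ((l0 :: rest).foldl (fun (p : List Int × Int) line =>
          (p.1 ++ [p.2 + (line.length : Int)], p.2 + (line.length : Int))) ([], 0)).1
          = (l0.length : Int) :: cums (l0.length : Int) rest := by
        rw [foldl_cum]
        simp [cums]
      have hpw : ((l0.length : Int) :: cums (l0.length : Int) rest).Pairwise (· ≤ ·) := by
        have := cums_pairwise (l0 :: rest) 0
        simpa [cums] using this
      dsimp only
      rw [loopA_eq rest i 0 0 (l0.length : Int) hbound]
      simp only [hcum]
      rw [bsearch_eq _ i hpw _ 0 _ (le_refl _) (le_refl _) (Nat.zero_le _)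
            (refK_le_length _ i)]
      rw [refStart_eq]
      refine Prod.ext (by push_cast; ring) rfl
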